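-- pv_equiv track=rewrite | github.com/IKAROSOO/CodingTest | Programmers/Lv1 문제/77484_02.py | solution
-- ===== SOURCE A (Python) =====
-- def solution(lottos, win_nums):
--     rank = [6, 6, 5, 4, 3, 2, 1]
--
--     cnt_0 = lottos.count(0)
--     cnt = 0
--
--     for num in win_nums:
--         if num in lottos:
--             cnt += 1
--
--     return rank[cnt_0+cnt], rank[cnt]
-- ===== SOURCE B (Python) =====
-- def solution(lottos, win_nums):
--     # Invert the loop roles: build a frequency table of win_nums once, then make a
--     # single pass over lottos, counting zeros and summing each distinct lotto
--     # number's frequency among the winning numbers; ranks come from a conditional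
--     # formula instead of a table.
--     freq = {}
--     for w in win_nums:
--         freq[w] = freq.get(w, 0) + 1
--     zeros = cnt = 0
--     seen = set()
--     for n in lottos:
--         if n == 0:
--             zeros += 1
--         if n not in seen:
--             seen.add(n)
--             cnt += freq.get(n, 0)
--     best = zeros + cnt
--     return (7 - best if best >= 2 else 6, 7 - cnt if cnt >= 2 else 6)
-- ===== Notes on version B (the rewrite author's own statement) =====
-- stated objective: faster
-- what changed: Inverts the loop roles: instead of scanning lottos for each winning number, B builds a frequency dict of win_nums once and makes a single pass over lottos summing each distinct number's winning frequency (tracking zeros in the same pass), and derives the ranks by a conditional formula instead of a lookup table.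
-- outside the precondition, e.g. on solution([0, 0, 0, 0, 0, 0, 0], []): A raises IndexError, B returns (0, 6)
import Mathlib
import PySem

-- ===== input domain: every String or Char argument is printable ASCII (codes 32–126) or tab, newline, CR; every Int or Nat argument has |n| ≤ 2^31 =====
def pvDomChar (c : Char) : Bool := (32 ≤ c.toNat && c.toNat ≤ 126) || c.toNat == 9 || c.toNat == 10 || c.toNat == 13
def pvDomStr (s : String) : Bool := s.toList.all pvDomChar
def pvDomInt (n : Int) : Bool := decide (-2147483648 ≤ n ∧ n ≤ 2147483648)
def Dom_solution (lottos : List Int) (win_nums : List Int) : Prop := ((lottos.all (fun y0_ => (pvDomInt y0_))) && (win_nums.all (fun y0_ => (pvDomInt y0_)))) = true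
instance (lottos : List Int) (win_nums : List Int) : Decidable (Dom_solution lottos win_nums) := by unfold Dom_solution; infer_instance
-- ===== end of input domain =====

-- B inverts the loop roles (frequency dict of win_nums + one pass over lottos) and derives
-- ranks by a conditional formula instead of A's lookup table; equal return values on Pre_.

-- ===== PORT A =====
def solution (lottos : List Int) (win_nums : List Int) : Int × Int :=
  let rank : List Int := [6, 6, 5, 4, 3, 2, 1]
  let cnt_0 : Int := (PySem.List.count lottos 0 : Int)
  let cnt : Int := win_nums.foldl (fun c num => if num ∈ lottos then c + 1 else c) 0
  -- rank[cnt_0+cnt], rank[cnt]: Python raises IndexError out of range; Pre_ keeps the index in range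
  (PySem.List.pyGetD rank (cnt_0 + cnt) 0, PySem.List.pyGetD rank cnt 0)

-- ===== PORT B =====
def solution_alt (lottos : List Int) (win_nums : List Int) : Int × Int :=
  let freq : PySem.Dict Int Int :=
    win_nums.foldl (fun d w => d.insert w (d.getD w 0 + 1)) PySem.Dict.empty
  let st : Int × Int × PySem.Set Int :=
    lottos.foldl (fun st n =>
      let zeros : Int := if n = 0 then st.1 + 1 else st.1
      if n ∈ st.2.2 then (zeros, st.2.1, st.2.2)
      else (zeros, st.2.1 + freq.getD n 0, st.2.2.add n)) (0, 0, PySem.Set.ofList [])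
  let best : Int := st.1 + st.2.1
  ((if best ≥ 2 then 7 - best else 6), (if st.2.1 ≥ 2 then 7 - st.2.1 else 6))

-- ===== PRECONDITION & SPEC =====
-- Pre_ excludes inputs where zeros-in-lottos plus matched win_nums exceed 6 (needs duplicates):
-- there A's rank[...] raises IndexError.
def Pre_solution (lottos : List Int) (win_nums : List Int) : Prop :=
  lottos.count 0 + win_nums.countP (fun n => decide (n ∈ lottos)) ≤ 6
instance (lottos : List Int) (win_nums : List Int) : Decidable (Pre_solution lottos win_nums) := by unfold Pre_solution; infer_instance
def pvWitness_solution : List Int × List Int := ([44, 1, 0, 0, 31, 25], [31, 10, 45, 1, 6, 19])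

def Spec_solution (lottos : List Int) (win_nums : List Int) (out : Int × Int) : Prop := out = solution_alt lottos win_nums
instance (lottos : List Int) (win_nums : List Int) (out : Int × Int) : Decidable (Spec_solution lottos win_nums out) := by unfold Spec_solution; infer_instance

-- ===== CLAIM (what is proved, stated in full; the proofs are below) =====
def Claim_equal_solution : Prop := ∀ (lottos : List Int) (win_nums : List Int), Dom_solution lottos win_nums → Pre_solution lottos win_nums → Spec_solution lottos win_nums (solution lottos win_nums)

-- ===== LEMMAS AND PROOFS =====

-- the body of B's single pass, named for the invariant proof (identical to the lambda in solution_alt)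
def bStep (win_nums : List Int) (st : Int × Int × PySem.Set Int) (n : Int) : Int × Int × PySem.Set Int :=
  let z : Int := if n = 0 then st.1 + 1 else st.1
  if n ∈ st.2.2 then (z, st.2.1, st.2.2)
  else (z, st.2.1 + (win_nums.foldl (fun d w => d.insert w (d.getD w 0 + 1)) PySem.Dict.empty).getD n 0, st.2.2.add n)

-- A's membership loop counts the winning numbers found in lottos
theorem foldA_eq (lottos : List Int) (win_nums : List Int) :
    win_nums.foldl (fun c num => if num ∈ lottos then c + 1 else c) (0 : Int)
      = (win_nums.countP (fun n => decide (n ∈ lottos)) : Int) := by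
  simpa using PySem.List.foldl_ite_add_one (fun num => num ∈ lottos) win_nums (0 : Int)

-- counts are additive over a pointwise-disjoint split of the predicate
theorem countP_split {p q r : Int → Bool}
    (h : ∀ w, (if p w then 1 else 0) + (if q w then 1 else 0) = (if r w then (1 : Nat) else 0)) :
    ∀ l : List Int, l.countP p + l.countP q = l.countP r := by
  intro l
  induction l with
  | nil => simp
  | cons x xs ih =>
    simp only [List.countP_cons]
    have := h x
    omega

-- B's single pass: zeros counts 0-entries, cnt sums win-frequencies of unseen lotto numbers
theorem loop_inv (win_nums : List Int) :
    ∀ (lottos : List Int) (zeros cnt : Int) (seen : PySem.Set Int),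
    (List.foldl (bStep win_nums) (zeros, cnt, seen) lottos).1 = zeros + (lottos.count 0 : Int)
    ∧ (List.foldl (bStep win_nums) (zeros, cnt, seen) lottos).2.1
      = cnt + (win_nums.countP (fun w => decide (w ∈ lottos ∧ ¬ w ∈ seen)) : Int) := by
  intro lottos
  induction lottos with
  | nil => intro zeros cnt seen; simp
  | cons n rest ih =>
    intro zeros cnt seen
    have hfreq : (win_nums.foldl (fun d w => d.insert w (d.getD w 0 + 1)) PySem.Dict.empty).getD n 0
        = (win_nums.count n : Int) := by
      rw [PySem.Dict.getD_foldl_insert_add_one]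
      simp [PySem.Dict.getD_empty]
    simp only [List.foldl_cons]
    by_cases hm : n ∈ seen
    · have hstep : bStep win_nums (zeros, cnt, seen) n
          = ((if n = 0 then zeros + 1 else zeros), cnt, seen) := by
        simp [bStep, hm]
      rw [hstep]
      obtain ⟨h1, h2⟩ := ih (if n = 0 then zeros + 1 else zeros) cnt seen
      constructor
      · rw [h1]; by_cases hn0 : n = 0 <;> simp [hn0] <;> ring
      · rw [h2]
        congr 2
        apply List.countP_congr
        intro w _
        simp only [decide_eq_true_eq, List.mem_cons]
        constructor
        · rintro ⟨hw, hs⟩; exact ⟨Or.inr hw, hs⟩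
        · rintro ⟨(rfl | hw), hs⟩
          · exact absurd hm hs
          · exact ⟨hw, hs⟩
    · have hstep : bStep win_nums (zeros, cnt, seen) n
          = ((if n = 0 then zeros + 1 else zeros),
             cnt + (win_nums.foldl (fun d w => d.insert w (d.getD w 0 + 1)) PySem.Dict.empty).getD n 0,
             seen.add n) := by
        simp [bStep, hm]
      rw [hstep]
      obtain ⟨h1, h2⟩ := ih (if n = 0 then zeros + 1 else zeros)
        (cnt + (win_nums.foldl (fun d w => d.insert w (d.getD w 0 + 1)) PySem.Dict.empty).getD n 0) (seen.add n)
      constructor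
      · rw [h1]; by_cases hn0 : n = 0 <;> simp [hn0] <;> ring
      · rw [h2, hfreq]
        rw [List.count_eq_countP]
        have hsplit : win_nums.countP (fun w => decide (w = n))
            + win_nums.countP (fun w => decide (w ∈ rest ∧ ¬ w ∈ seen.add n))
            = win_nums.countP (fun w => decide (w ∈ (n :: rest) ∧ ¬ w ∈ seen)) := by
          apply countP_split
          intro w
          by_cases hw : w = n
          · subst hw
            simp [hm]
          · simp [PySem.Set.mem_add, hw, List.mem_cons]
        rw [← hsplit]
        push_cast
        have hbeq : (win_nums.countP fun w => w == n) = (win_nums.countP fun w => decide (w = n)) := by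
          apply List.countP_congr; intro w _; simp
        rw [hbeq]
        ring

-- table lookup equals the conditional rank formula, for indices 0..6
theorem rank_formula (k : Nat) (hk : k ≤ 6) :
    PySem.List.pyGetD ([6, 6, 5, 4, 3, 2, 1] : List Int) (k : Int) 0
      = (if (k : Int) ≥ 2 then 7 - (k : Int) else 6) := by
  interval_cases k <;> decide

-- ===== VERDICT (by name: the statement is the Claim_ definition above) =====
theorem solution_spec : Claim_equal_solution := by
  intro lottos win_nums _ hpre
  unfold Spec_solution solution solution_alt Pre_solution at *
  simp only []
  have hfold : lottos.foldl (fun st n =>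
      let z : Int := if n = 0 then st.1 + 1 else st.1
      if n ∈ st.2.2 then (z, st.2.1, st.2.2)
      else (z, st.2.1 + (win_nums.foldl (fun d w => d.insert w (d.getD w 0 + 1)) PySem.Dict.empty).getD n 0, st.2.2.add n))
      ((0 : Int), (0 : Int), PySem.Set.ofList ([] : List Int))
      = List.foldl (bStep win_nums) ((0 : Int), (0 : Int), PySem.Set.ofList ([] : List Int)) lottos := rfl
  rw [hfold]
  obtain ⟨h1, h2⟩ := loop_inv win_nums lottos 0 0 (PySem.Set.ofList [])
  rw [h1, h2, foldA_eq, PySem.List.count_eq]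
  have hb : (win_nums.countP fun w => decide (w ∈ lottos ∧ ¬ w ∈ PySem.Set.ofList ([] : List Int)))
      = (win_nums.countP fun n => decide (n ∈ lottos)) := by
    apply List.countP_congr; intro w _; simp
  rw [hb]
  set c := win_nums.countP (fun n => decide (n ∈ lottos)) with hc
  set z := lottos.count 0 with hz
  simp only [zero_add]
  rw [show ((z : Int) + (c : Int)) = ((z + c : Nat) : Int) by push_cast; ring,
      rank_formula (z + c) (by omega), rank_formula c (by omega)]
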